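-- pv_equiv track=rewrite | github.com/rubelw/OSSS | src/OSSS/ai/agents/query_data/handlers/scorecard_kpis_handler.py | _order_scorecard_kpi_fields
-- ===== SOURCE A (Python) =====
-- from typing import Any, Dict, List
--
-- def _order_scorecard_kpi_fields(fieldnames: List[str]) -> List[str]:
--     """
--     Put the most useful scorecard_kpis fields first, and move 'id' to the end
--     if present, while preserving any other fields.
--     """
--     if not fieldnames:
--         return fieldnames
--
--     preferred_first = [
--         "scorecard_id",
--         "kpi_id",
--         "name",
--         "target_value",
--         "current_value",
--         "status",
--         "created_at",
--         "updated_at",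
--     ]
--
--     ordered: List[str] = []
--     for f in preferred_first:
--         if f in fieldnames:
--             ordered.append(f)
--
--     # Any remaining non-id fields
--     for f in fieldnames:
--         if f not in ordered and f != "id":
--             ordered.append(f)
--
--     # Put id last if present
--     if "id" in fieldnames:
--         ordered.append("id")
--
--     return ordered
-- ===== SOURCE B (Python) =====
-- from typing import List
--
--
-- def _order_scorecard_kpi_fields(fieldnames: List[str]) -> List[str]:
--     """
--     Same ordering computed by one stable sort: deduplicate (first occurrence
--     wins), then sort by an integer rank -- preferred fields by their position
--     in the preferred list, other fields by their first position in the input,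
--     and 'id' after everything.
--     """
--     if not fieldnames:
--         return fieldnames
--
--     preferred_first = [
--         "scorecard_id",
--         "kpi_id",
--         "name",
--         "target_value",
--         "current_value",
--         "status",
--         "created_at",
--         "updated_at",
--     ]
--     rank = {f: i for i, f in enumerate(preferred_first)}
--     base = len(preferred_first)
--
--     first_pos = {}
--     for i, f in enumerate(fieldnames):
--         if f not in first_pos:
--             first_pos[f] = base + i
--
--     def key(f):
--         if f in rank:
--             return rank[f]
--         if f == "id":
--             return base + len(fieldnames)
--         return first_pos[f]
--
--     return sorted(dict.fromkeys(fieldnames), key=key)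
-- ===== Notes on version B (the rewrite author's own statement) =====
-- stated objective: faster
-- what changed: Replaces A's append-and-rescan loops (membership tests against the growing 'ordered' list) by a single stable sort of the deduplicated input under an integer rank: preferred names rank by their position in the preferred list, other names by their first position in the input, and 'id' after everything.
import Mathlib
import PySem

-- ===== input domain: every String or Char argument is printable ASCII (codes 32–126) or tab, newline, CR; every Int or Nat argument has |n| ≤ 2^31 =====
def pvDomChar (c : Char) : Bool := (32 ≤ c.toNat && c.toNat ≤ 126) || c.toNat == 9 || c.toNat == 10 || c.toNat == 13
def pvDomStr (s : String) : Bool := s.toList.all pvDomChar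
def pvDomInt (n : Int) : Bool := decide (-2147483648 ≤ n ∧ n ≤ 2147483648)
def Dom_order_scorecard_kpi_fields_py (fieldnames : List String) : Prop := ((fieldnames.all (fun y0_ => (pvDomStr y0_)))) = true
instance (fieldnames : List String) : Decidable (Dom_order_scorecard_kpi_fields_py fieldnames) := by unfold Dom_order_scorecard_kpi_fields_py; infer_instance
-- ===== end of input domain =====

-- B replaces A's quadratic append-and-scan loops by one stable sort of the deduplicated
-- input under an integer rank (alternative algorithm; return values proved equal).

-- ===== PORT A =====
def order_scorecard_kpi_fields_py (fieldnames : List String) : List String :=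
  if fieldnames = [] then fieldnames
  else
    let preferred_first : List String :=
      ["scorecard_id", "kpi_id", "name", "target_value",
       "current_value", "status", "created_at", "updated_at"]
    -- for f in preferred_first: if f in fieldnames: ordered.append(f)
    let ordered : List String :=
      preferred_first.foldl (fun acc f => if f ∈ fieldnames then acc ++ [f] else acc) []
    -- for f in fieldnames: if f not in ordered and f != "id": ordered.append(f)
    let ordered : List String :=
      fieldnames.foldl (fun acc f => if f ∉ acc ∧ f ≠ "id" then acc ++ [f] else acc) ordered
    if "id" ∈ fieldnames then ordered ++ ["id"] else ordered

-- ===== PORT B =====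
-- helpers mirroring Source B: preferred_first, rank, base, first_pos, key
def pvPrefB : List String :=
  ["scorecard_id", "kpi_id", "name", "target_value",
   "current_value", "status", "created_at", "updated_at"]

-- rank = {f: i for i, f in enumerate(preferred_first)}
def pvRankB : PySem.Dict String Int :=
  (PySem.List.enumerate pvPrefB).foldl (fun d p => d.insert p.2 p.1) PySem.Dict.empty

-- base = len(preferred_first)
def pvBaseB : Int := PySem.List.len pvPrefB

-- first_pos: first occurrence index of each field, offset by base
def pvFirstPosB (fieldnames : List String) : PySem.Dict String Int :=
  (PySem.List.enumerate fieldnames).foldl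
    (fun d p => if d.contains p.2 then d else d.insert p.2 (pvBaseB + p.1))
    PySem.Dict.empty

-- def key(f): ...
def pvKeyB (fieldnames : List String) (f : String) : Int :=
  if pvRankB.contains f then pvRankB.getD f 0
  else if f = "id" then pvBaseB + PySem.List.len fieldnames
  else (pvFirstPosB fieldnames).getD f 0

def order_scorecard_kpi_fields_py_alt (fieldnames : List String) : List String :=
  if fieldnames = [] then fieldnames
  else PySem.List.sorted (PySem.List.dedup fieldnames) (pvKeyB fieldnames)

-- ===== PRECONDITION & SPEC =====
def Spec_order_scorecard_kpi_fields_py (fieldnames : List String) (out : List String) : Prop := out = order_scorecard_kpi_fields_py_alt fieldnames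
instance (fieldnames : List String) (out : List String) : Decidable (Spec_order_scorecard_kpi_fields_py fieldnames out) := by unfold Spec_order_scorecard_kpi_fields_py; infer_instance

-- ===== CLAIM (what is proved, stated in full; the proofs are below) =====
def Claim_equal_order_scorecard_kpi_fields_py : Prop := ∀ (fieldnames : List String), Dom_order_scorecard_kpi_fields_py fieldnames → Spec_order_scorecard_kpi_fields_py fieldnames (order_scorecard_kpi_fields_py fieldnames)

-- ===== LEMMAS AND PROOFS =====

-- A's second loop, as a structural recursion (used only in the proofs).
def pvRest (l acc : List String) : List String :=
  match l with
  | [] => []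
  | f :: t => if f ∉ acc ∧ f ≠ "id" then f :: pvRest t (acc ++ [f]) else pvRest t acc

theorem pvFoldl_eq_rest (l : List String) : ∀ acc : List String,
    l.foldl (fun acc f => if f ∉ acc ∧ f ≠ "id" then acc ++ [f] else acc) acc
      = acc ++ pvRest l acc := by
  induction l with
  | nil => intro acc; simp [pvRest]
  | cons f t ih =>
    intro acc
    by_cases h : f ∉ acc ∧ f ≠ "id"
    · simp only [List.foldl_cons, pvRest, if_pos h, ih (acc ++ [f]), List.append_assoc,
        List.singleton_append]
    · simp only [List.foldl_cons, pvRest, if_neg h, ih acc]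

theorem pvMem_rest (l : List String) : ∀ (acc : List String) (x : String),
    x ∈ pvRest l acc ↔ x ∈ l ∧ x ∉ acc ∧ x ≠ "id" := by
  induction l with
  | nil => intro acc x; simp [pvRest]
  | cons f t ih =>
    intro acc x
    by_cases h : f ∉ acc ∧ f ≠ "id"
    · simp only [pvRest, if_pos h, List.mem_cons, ih (acc ++ [f]), List.mem_append,
        List.mem_singleton]
      by_cases hxf : x = f
      · subst hxf; tauto
      · tauto
    · simp only [pvRest, if_neg h, ih acc, List.mem_cons]
      by_cases hxf : x = f
      · subst hxf; tauto
      · tauto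

theorem pvPairwise_rest (l : List String) : ∀ acc : List String,
    (pvRest l acc).Pairwise (fun a b => l.idxOf a < l.idxOf b) := by
  induction l with
  | nil => intro acc; simp [pvRest]
  | cons f t ih =>
    intro acc
    by_cases h : f ∉ acc ∧ f ≠ "id"
    · simp only [pvRest, if_pos h]
      refine List.pairwise_cons.2 ⟨?_, ?_⟩
      · intro b hb
        have hbmem := (pvMem_rest t (acc ++ [f]) b).1 hb
        have hbf : b ≠ f := by
          intro hc; exact hbmem.2.1 (by simp [hc])
        rw [List.idxOf_cons_self]
        rw [List.idxOf_cons_ne _ (by simpa using fun hc => hbf hc.symm)]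
        omega
      · refine (ih (acc ++ [f])).imp_of_mem ?_
        intro a b ha hb hab
        have haf : a ≠ f := fun hc => ((pvMem_rest t (acc ++ [f]) a).1 ha).2.1 (by simp [hc])
        have hbf : b ≠ f := fun hc => ((pvMem_rest t (acc ++ [f]) b).1 hb).2.1 (by simp [hc])
        rw [List.idxOf_cons_ne _ (by simpa using fun hc => haf hc.symm),
          List.idxOf_cons_ne _ (by simpa using fun hc => hbf hc.symm)]
        omega
    · simp only [pvRest, if_neg h]
      rw [not_and_or, not_not, ne_eq, not_not] at h
      refine (ih acc).imp_of_mem ?_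
      intro a b ha hb hab
      have hamem := (pvMem_rest t acc a).1 ha
      have hbmem := (pvMem_rest t acc b).1 hb
      have haf : a ≠ f := by
        intro hc; subst hc
        rcases h with h | h
        · exact hamem.2.1 h
        · exact hamem.2.2 h
      have hbf : b ≠ f := by
        intro hc; subst hc
        rcases h with h | h
        · exact hbmem.2.1 h
        · exact hbmem.2.2 h
      rw [List.idxOf_cons_ne _ (by simpa using fun hc => haf hc.symm),
        List.idxOf_cons_ne _ (by simpa using fun hc => hbf hc.symm)]
      omega

-- rank membership: pvRankB contains exactly the preferred names
theorem pvRank_contains (f : String) : pvRankB.contains f = true ↔ f ∈ pvPrefB := by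
  rw [PySem.Dict.contains_eq_decide_mem_keys]
  have hk : pvRankB.keys = pvPrefB := rfl
  rw [hk]; simp

-- first_pos lookups: kept keys are never overwritten
theorem pvFoldl_firstPos_keep (ps : List (Int × String)) :
    ∀ (d : PySem.Dict String Int) (f : String), d.contains f = true →
    (ps.foldl (fun d p => if d.contains p.2 then d else d.insert p.2 (pvBaseB + p.1)) d).get? f
      = d.get? f := by
  induction ps with
  | nil => intro d f h; rfl
  | cons p ps ih =>
    intro d f h
    simp only [List.foldl_cons]
    by_cases hc : d.contains p.2 = true
    · rw [if_pos hc]; exact ih d f h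
    · rw [if_neg hc]
      have hne : f ≠ p.2 := by intro e; rw [e] at h; exact hc h
      have hc' : (d.insert p.2 (pvBaseB + p.1)).contains f = true := by
        rw [PySem.Dict.contains_insert]; simp [h]
      rw [ih _ f hc', PySem.Dict.get?_insert_of_ne _ _ hne]

theorem pvFirstPos_getD (l : List String) : ∀ (s : Int) (d : PySem.Dict String Int) (f : String),
    d.contains f = false → f ∈ l →
    ((PySem.List.enumerate l s).foldl
        (fun d p => if d.contains p.2 then d else d.insert p.2 (pvBaseB + p.1)) d).getD f 0
      = pvBaseB + s + (l.idxOf f : Int) := by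
  induction l with
  | nil => intro s d f _ hf; cases hf
  | cons x t ih =>
    intro s d f hd hf
    rw [PySem.List.enumerate_cons, List.foldl_cons]
    by_cases hx : x = f
    · subst hx
      rw [if_neg (by simp [hd])]
      have hc' : (d.insert x (pvBaseB + s)).contains x = true := by
        rw [PySem.Dict.contains_insert]; simp
      rw [PySem.Dict.getD_eq_get?_getD, pvFoldl_firstPos_keep _ _ _ hc',
        PySem.Dict.get?_insert_self]
      simp [List.idxOf_cons_self]
    · have hft : f ∈ t := by
        rcases List.mem_cons.1 hf with h | h
        · exact absurd h.symm hx
        · exact h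
      have hidx : List.idxOf f (x :: t) = (List.idxOf f t).succ :=
        List.idxOf_cons_ne _ hx
      by_cases hc : d.contains x = true
      · rw [if_pos hc, ih (s + 1) d f hd hft, hidx]
        push_cast; ring
      · rw [if_neg hc]
        have hd' : (d.insert x (pvBaseB + s)).contains f = false := by
          rw [PySem.Dict.contains_insert]
          have hfx : ¬ f = x := fun e => hx e.symm
          simp [hd, hfx]
        rw [ih (s + 1) _ f hd' hft, hidx]
        push_cast; ring

theorem pvKey_of_other (fieldnames : List String) (f : String)
    (hf : f ∈ fieldnames) (hnp : f ∉ pvPrefB) (hni : f ≠ "id") :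
    pvKeyB fieldnames f = pvBaseB + (fieldnames.idxOf f : Int) := by
  unfold pvKeyB
  rw [if_neg (fun hc => hnp ((pvRank_contains f).1 hc)), if_neg hni]
  unfold pvFirstPosB
  have := pvFirstPos_getD fieldnames 0 PySem.Dict.empty f (by rfl) hf
  rw [this]; ring

-- the eight preferred names map to the ranks 0..7, whatever fieldnames is
theorem pvKey_map_pref (fieldnames : List String) :
    pvPrefB.map (pvKeyB fieldnames) = [0, 1, 2, 3, 4, 5, 6, 7] := rfl

theorem pvKey_pref_bounds (fieldnames : List String) (f : String) (hf : f ∈ pvPrefB) :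
    0 ≤ pvKeyB fieldnames f ∧ pvKeyB fieldnames f ≤ 7 := by
  have hm : pvKeyB fieldnames f ∈ pvPrefB.map (pvKeyB fieldnames) :=
    List.mem_map_of_mem hf
  rw [pvKey_map_pref] at hm
  simp only [List.mem_cons, List.not_mem_nil, or_false] at hm
  rcases hm with h | h | h | h | h | h | h | h <;> omega

theorem pvKey_pref_pairwise (fieldnames : List String) :
    pvPrefB.Pairwise (fun a b => pvKeyB fieldnames a < pvKeyB fieldnames b) := by
  rw [← List.pairwise_map (f := pvKeyB fieldnames), pvKey_map_pref]
  decide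

theorem pvKey_id (fieldnames : List String) :
    pvKeyB fieldnames "id" = pvBaseB + PySem.List.len fieldnames := by
  unfold pvKeyB
  rw [if_neg (by decide), if_pos rfl]

-- ===== VERDICT (by name: the statement is the Claim_ definition above) =====
theorem order_scorecard_kpi_fields_py_spec : Claim_equal_order_scorecard_kpi_fields_py := by
  intro fieldnames _
  unfold Spec_order_scorecard_kpi_fields_py
  unfold order_scorecard_kpi_fields_py order_scorecard_kpi_fields_py_alt
  by_cases hemp : fieldnames = []
  · rw [if_pos hemp, if_pos hemp]
  · rw [if_neg hemp, if_neg hemp]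
    dsimp only
    rw [show (["scorecard_id", "kpi_id", "name", "target_value",
         "current_value", "status", "created_at", "updated_at"] : List String) = pvPrefB from rfl]
    rw [PySem.List.foldl_append_ite_eq_filter (fun f => f ∈ fieldnames) pvPrefB [],
      List.nil_append]
    set P := pvPrefB.filter (fun f => decide (f ∈ fieldnames)) with hPdef
    rw [pvFoldl_eq_rest fieldnames P]
    set O := pvRest fieldnames P with hOdef
    set I : List String := if "id" ∈ fieldnames then ["id"] else [] with hIdef
    have hout : (if "id" ∈ fieldnames then (P ++ O) ++ ["id"] else P ++ O) = (P ++ O) ++ I := by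
      rw [hIdef]; split_ifs <;> simp
    rw [hout]
    -- facts
    have hbase : pvBaseB = 8 := rfl
    have hlen : PySem.List.len fieldnames = (fieldnames.length : Int) := rfl
    have memP : ∀ x, x ∈ P ↔ x ∈ pvPrefB ∧ x ∈ fieldnames := by
      intro x; rw [hPdef]; simp [List.mem_filter]
    have memO : ∀ x, x ∈ O ↔ x ∈ fieldnames ∧ x ∉ P ∧ x ≠ "id" :=
      fun x => pvMem_rest fieldnames P x
    have hOnp : ∀ x ∈ O, x ∉ pvPrefB := by
      intro x hx hp
      exact ((memO x).1 hx).2.1 ((memP x).2 ⟨hp, ((memO x).1 hx).1⟩)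
    have keyPb : ∀ a ∈ P, 0 ≤ pvKeyB fieldnames a ∧ pvKeyB fieldnames a ≤ 7 :=
      fun a ha => pvKey_pref_bounds fieldnames a ((memP a).1 ha).1
    have keyO : ∀ b ∈ O, pvKeyB fieldnames b = 8 + (fieldnames.idxOf b : Int) := by
      intro b hb
      have h := pvKey_of_other fieldnames b ((memO b).1 hb).1 (hOnp b hb) ((memO b).1 hb).2.2
      rw [h, hbase]
    have keyId : pvKeyB fieldnames "id" = 8 + (fieldnames.length : Int) := by
      rw [pvKey_id, hbase, hlen]
    have hpair : ((P ++ O) ++ I).Pairwise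
        (fun a b => pvKeyB fieldnames a < pvKeyB fieldnames b) := by
      refine List.pairwise_append.2 ⟨List.pairwise_append.2 ⟨?_, ?_, ?_⟩, ?_, ?_⟩
      · exact (pvKey_pref_pairwise fieldnames).filter _
      · refine (pvPairwise_rest fieldnames P).imp_of_mem ?_
        intro a b ha hb hab
        rw [keyO a ha, keyO b hb]
        omega
      · intro a ha b hb
        have h1 := keyPb a ha
        rw [keyO b hb]
        omega
      · rw [hIdef]; split_ifs <;> simp
      · intro a ha b hb
        have hbid : b = "id" := by
          rw [hIdef] at hb; split_ifs at hb <;> simp_all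
        subst hbid
        rw [keyId]
        rcases List.mem_append.1 ha with hp | ho
        · have h1 := keyPb a hp
          omega
        · have h1 := keyO a ho
          have h2 : List.idxOf a fieldnames < fieldnames.length :=
            List.idxOf_lt_length_of_mem ((memO a).1 ho).1
          omega
    have hnodup : ((P ++ O) ++ I).Nodup :=
      hpair.imp (fun {a b} h e => absurd h (by rw [e]; exact lt_irrefl _))
    have hmemiff : ∀ a, a ∈ (P ++ O) ++ I ↔ a ∈ PySem.List.dedup fieldnames := by
      intro a
      rw [PySem.List.mem_dedup]
      simp only [List.mem_append]
      constructor
      · rintro ((hp | ho) | hi)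
        · exact ((memP a).1 hp).2
        · exact ((memO a).1 ho).1
        · rw [hIdef] at hi; split_ifs at hi with hid <;> simp_all
      · intro hfn
        by_cases hp : a ∈ pvPrefB
        · exact Or.inl (Or.inl ((memP a).2 ⟨hp, hfn⟩))
        · by_cases hai : a = "id"
          · subst hai
            right; rw [hIdef, if_pos hfn]; simp
          · exact Or.inl (Or.inr ((memO a).2
              ⟨hfn, fun hP => hp ((memP a).1 hP).1, hai⟩))
    have hperm : ((P ++ O) ++ I).Perm (PySem.List.dedup fieldnames) :=
      (List.perm_ext_iff_of_nodup hnodup (PySem.List.nodup_dedup fieldnames)).2 hmemiff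
    exact (PySem.List.sorted_eq_of_perm_of_pairwise_lt
      (PySem.List.dedup fieldnames) ((P ++ O) ++ I) (pvKeyB fieldnames) hperm hpair).symm
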